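-- pv_equiv track=rewrite | github.com/RectoLn/NanoAgent | app/tools/install_skill.py | _first_section_excerpt
-- ===== SOURCE A (Python) =====
-- def _first_section_excerpt(text: str, max_lines: int = 8) -> str:
--     lines = []
--     in_frontmatter = text.startswith("---")
--     frontmatter_delimiters = 0
--     for raw_line in text.splitlines():
--         line = raw_line.rstrip()
--         if in_frontmatter:
--             if line == "---":
--                 frontmatter_delimiters += 1
--                 if frontmatter_delimiters >= 2:
--                     in_frontmatter = False
--             continue
--         if line.startswith("# "):
--             continue
--         if line.strip():
--             lines.append(line)
--         if len(lines) >= max_lines: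
--             break
--     return "\n".join(lines)
-- ===== SOURCE B (Python) =====
-- def _first_section_excerpt(text: str, max_lines: int = 8) -> str:
--     lines = [raw.rstrip() for raw in text.splitlines()]
--     if text.startswith("---"):
--         def after_delim(ls):
--             try:
--                 return ls[ls.index("---") + 1:]
--             except ValueError:
--                 return []
--         body = after_delim(after_delim(lines))
--     else:
--         body = lines
--     kept = [l for l in body if l.strip() and not l.startswith("# ")]
--     return "\n".join(kept[:max(0, max_lines)])
-- ===== Notes on version B (the rewrite author's own statement) =====
-- stated objective: simpler
-- what changed: Replaces A's single stateful accumulate-and-break loop (in_frontmatter flag, delimiter counter, length-triggered break) with a pipeline: locate the body by slicing past the second frontmatter delimiter line (list.index twice), then filter nonblank non-heading lines and truncate with kept[:max(0, max_lines)].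
-- intended difference: On max_lines <= 0 with a text containing any non-whitespace character, A's append-then-break loop returns the first body line that survives the filters (or an empty excerpt when none does) even though no lines were requested, while B always returns the empty excerpt, the intended result for a non-positive line budget. — e.g. on _first_section_excerpt("a", 0): A returns "a", B returns ""
import Mathlib
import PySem

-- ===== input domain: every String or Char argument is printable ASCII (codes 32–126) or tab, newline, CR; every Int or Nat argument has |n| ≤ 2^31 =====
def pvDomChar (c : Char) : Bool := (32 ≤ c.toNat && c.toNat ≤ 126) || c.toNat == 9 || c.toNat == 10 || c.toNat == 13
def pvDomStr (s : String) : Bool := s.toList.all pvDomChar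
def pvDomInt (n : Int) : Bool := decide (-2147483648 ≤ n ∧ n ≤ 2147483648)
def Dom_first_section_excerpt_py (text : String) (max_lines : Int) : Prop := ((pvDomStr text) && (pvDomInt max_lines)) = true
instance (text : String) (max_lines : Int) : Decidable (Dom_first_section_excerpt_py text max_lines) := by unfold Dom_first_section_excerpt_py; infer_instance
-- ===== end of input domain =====

-- B replaces A's single stateful accumulate-and-break loop by a pipeline (slice past the second
-- frontmatter delimiter, filter, truncate); on a non-positive max_lines B returns the empty
-- excerpt where A's break-after-append quirk can return one line (the intended difference D_).


-- ===== PORT A =====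
-- the for-loop of A: state = (lines, in_frontmatter, frontmatter_delimiters); break = early return
def pvLoopA (max_lines : Int) : List String → List String → Bool → Int → List String
  | [], lines, _, _ => lines
  | raw :: rest, lines, infm, cnt =>
    let line := PySem.Str.rstrip raw
    if infm then
      if line == "---" then
        let cnt' := cnt + 1
        if 2 ≤ cnt' then pvLoopA max_lines rest lines false cnt'
        else pvLoopA max_lines rest lines true cnt'
      else pvLoopA max_lines rest lines true cnt
    else
      if PySem.Str.startswith line "# " then pvLoopA max_lines rest lines infm cnt
      else
        let lines' := if PySem.Str.strip line != "" then lines ++ [line] else lines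
        if max_lines ≤ (lines'.length : Int) then lines'
        else pvLoopA max_lines rest lines' infm cnt

def first_section_excerpt_py (text : String) (max_lines : Int) : String :=
  PySem.Str.join "\n" (pvLoopA max_lines (PySem.Str.splitlines text) [] (PySem.Str.startswith text "---") 0)

-- ===== PORT B =====
-- B's helper after_delim: ls[ls.index("---") + 1:], or [] when "---" is absent (ValueError)
def pvAfterDelimB (ls : List String) : List String :=
  match PySem.List.index? ls "---" with
  | some i => PySem.List.slice ls (some ((i : Int) + 1)) none
  | none => []

def first_section_excerpt_py_alt (text : String) (max_lines : Int) : String :=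
  let lines := (PySem.Str.splitlines text).map PySem.Str.rstrip
  let body := if PySem.Str.startswith text "---" then pvAfterDelimB (pvAfterDelimB lines) else lines
  let kept := body.filter (fun l => PySem.Str.strip l != "" && !PySem.Str.startswith l "# ")
  PySem.Str.join "\n" (PySem.List.slice kept none (some (max 0 max_lines)))

-- ===== PRECONDITION & SPEC =====
-- On inputs with max_lines <= 0 whose text has any non-whitespace character, A's append-then-break
-- loop can return one excerpt line (the first body line that survives the filters, or an empty
-- excerpt when none does) even though no lines were requested, while B returns the empty excerpt,
-- the intended result for a non-positive line budget.
def D_first_section_excerpt_py (text : String) (max_lines : Int) : Prop :=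
  max_lines ≤ 0 ∧ PySem.Str.strip text ≠ ""
instance (text : String) (max_lines : Int) : Decidable (D_first_section_excerpt_py text max_lines) := by
  unfold D_first_section_excerpt_py; infer_instance

def Spec_first_section_excerpt_py (text : String) (max_lines : Int) (out : String) : Prop :=
  ¬ D_first_section_excerpt_py text max_lines → out = first_section_excerpt_py_alt text max_lines
instance (text : String) (max_lines : Int) (out : String) : Decidable (Spec_first_section_excerpt_py text max_lines out) := by
  unfold Spec_first_section_excerpt_py; infer_instance

def pvDiffWitness_first_section_excerpt_py : String × Int := ("a", 0)
def pvDiffWitnessOut_first_section_excerpt_py : String × String := ("a", "")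

-- ===== CLAIM (what is proved, stated in full; the proofs are below) =====
def Claim_unchanged_first_section_excerpt_py : Prop := ∀ (text : String) (max_lines : Int), Dom_first_section_excerpt_py text max_lines → Spec_first_section_excerpt_py text max_lines (first_section_excerpt_py text max_lines)
def Claim_changed_first_section_excerpt_py : Prop := Dom_first_section_excerpt_py (pvDiffWitness_first_section_excerpt_py.1) (pvDiffWitness_first_section_excerpt_py.2) ∧ D_first_section_excerpt_py (pvDiffWitness_first_section_excerpt_py.1) (pvDiffWitness_first_section_excerpt_py.2) ∧ first_section_excerpt_py (pvDiffWitness_first_section_excerpt_py.1) (pvDiffWitness_first_section_excerpt_py.2) = pvDiffWitnessOut_first_section_excerpt_py.1 ∧ first_section_excerpt_py_alt (pvDiffWitness_first_section_excerpt_py.1) (pvDiffWitness_first_section_excerpt_py.2) = pvDiffWitnessOut_first_section_excerpt_py.2 ∧ pvDiffWitnessOut_first_section_excerpt_py.1 ≠ pvDiffWitnessOut_first_section_excerpt_py.2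

-- ===== LEMMAS AND PROOFS =====

-- proof-side view of the body lines (after the frontmatter), rstripped
def pvBody (text : String) : List String :=
  let ls := (PySem.Str.splitlines text).map PySem.Str.rstrip
  if PySem.Str.startswith text "---" then
    (((ls.dropWhile (fun l => l != "---")).tail).dropWhile (fun l => l != "---")).tail
  else ls

-- definitional unfoldings of A's loop
theorem pvLoopA_nil (ml : Int) (acc : List String) (infm : Bool) (cnt : Int) :
    pvLoopA ml [] acc infm cnt = acc := rfl

theorem pvLoopA_cons (ml : Int) (raw : String) (rest acc : List String) (infm : Bool) (cnt : Int) :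
    pvLoopA ml (raw :: rest) acc infm cnt =
      (let line := PySem.Str.rstrip raw
       if infm then
         if line == "---" then
           let cnt' := cnt + 1
           if 2 ≤ cnt' then pvLoopA ml rest acc false cnt'
           else pvLoopA ml rest acc true cnt'
         else pvLoopA ml rest acc true cnt
       else
         if PySem.Str.startswith line "# " then pvLoopA ml rest acc infm cnt
         else
           let lines' := if PySem.Str.strip line != "" then acc ++ [line] else acc
           if ml ≤ (lines'.length : Int) then lines'
           else pvLoopA ml rest lines' infm cnt) := rfl

-- once in_frontmatter is False the counter is dead state
theorem pvLoopA_false_cnt (ml : Int) : ∀ (ls acc : List String) (c c' : Int),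
    pvLoopA ml ls acc false c = pvLoopA ml ls acc false c' := by
  intro ls
  induction ls with
  | nil => intro acc c c'; rfl
  | cons raw rest ih =>
    intro acc c c'
    rw [pvLoopA_cons, pvLoopA_cons]
    simp only [Bool.false_eq_true, if_false]
    split
    · exact ih _ _ _
    · split <;> split
      · rfl
      · exact ih _ _ _
      · rfl
      · exact ih _ _ _

-- frontmatter scan, one delimiter already seen: skip to just after the next '---' line
theorem pvLoopA_fm1 (ml : Int) : ∀ (ls acc : List String),
    pvLoopA ml ls acc true 1 =
      pvLoopA ml ((ls.dropWhile (fun r => PySem.Str.rstrip r != "---")).tail) acc false 2 := by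
  intro ls
  induction ls with
  | nil => intro acc; rfl
  | cons raw rest ih =>
    intro acc
    rw [pvLoopA_cons]
    by_cases h : PySem.Str.rstrip raw = "---"
    · have he : (PySem.Str.rstrip raw == "---") = true := by simp [h]
      have hb : (PySem.Str.rstrip raw != "---") = false := by simp [h]
      simp only [he, if_true, hb, List.dropWhile_cons, Bool.false_eq_true, if_false,
        List.tail_cons, if_pos (show (2:Int) ≤ 1 + 1 by omega)]
      exact pvLoopA_false_cnt ml rest acc _ _
    · have he : (PySem.Str.rstrip raw == "---") = false := by simp [h]
      have hb : (PySem.Str.rstrip raw != "---") = true := by simp [h]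
      simp only [he, Bool.false_eq_true, if_false, if_true, hb, List.dropWhile_cons]
      exact ih acc

-- frontmatter scan from the start: skip to just after the first '---' line, one delimiter seen
theorem pvLoopA_fm0 (ml : Int) : ∀ (ls acc : List String),
    pvLoopA ml ls acc true 0 =
      pvLoopA ml ((ls.dropWhile (fun r => PySem.Str.rstrip r != "---")).tail) acc true 1 := by
  intro ls
  induction ls with
  | nil => intro acc; rfl
  | cons raw rest ih =>
    intro acc
    rw [pvLoopA_cons]
    by_cases h : PySem.Str.rstrip raw = "---"
    · have he : (PySem.Str.rstrip raw == "---") = true := by simp [h]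
      have hb : (PySem.Str.rstrip raw != "---") = false := by simp [h]
      simp only [he, if_true, hb, List.dropWhile_cons, Bool.false_eq_true, if_false,
        List.tail_cons, if_neg (show ¬ (2:Int) ≤ 0 + 1 by omega)]
      norm_num
    · have he : (PySem.Str.rstrip raw == "---") = false := by simp [h]
      have hb : (PySem.Str.rstrip raw != "---") = true := by simp [h]
      simp only [he, Bool.false_eq_true, if_false, if_true, hb, List.dropWhile_cons]
      exact ih acc

-- the body phase, budget not yet exhausted: append kept lines up to the budget
theorem pvLoopA_run_lt (ml : Int) : ∀ (ls acc : List String) (c : Int),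
    (acc.length : Int) < ml →
    pvLoopA ml ls acc false c =
      acc ++ ((ls.map PySem.Str.rstrip).filter
        (fun l => PySem.Str.strip l != "" && !PySem.Str.startswith l "# ")).take (ml - acc.length).toNat := by
  intro ls
  induction ls with
  | nil => intro acc c h; simp [pvLoopA_nil]
  | cons raw rest ih =>
    intro acc c h
    rw [pvLoopA_cons]
    simp only [Bool.false_eq_true, if_false, List.map_cons, List.filter_cons]
    by_cases hs : PySem.Str.startswith (PySem.Str.rstrip raw) "# " = true
    · simp only [hs, if_true, Bool.not_true, Bool.and_false, Bool.false_eq_true, if_false]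
      exact ih acc c h
    · have hs' : PySem.Str.startswith (PySem.Str.rstrip raw) "# " = false :=
        eq_false_of_ne_true hs
      simp only [hs', Bool.false_eq_true, if_false, Bool.not_false, Bool.and_true]
      by_cases hb : PySem.Str.strip (PySem.Str.rstrip raw) = ""
      · have hbb : (PySem.Str.strip (PySem.Str.rstrip raw) != "") = false := by simp [hb]
        simp only [hbb, Bool.false_eq_true, if_false]
        rw [if_neg (show ¬ ml ≤ ((acc.length : Int)) by omega)]
        exact ih acc c h
      · have hbb : (PySem.Str.strip (PySem.Str.rstrip raw) != "") = true := by simp [hb]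
        simp only [hbb, if_true]
        by_cases hfull : ml ≤ (acc.length : Int) + 1
        · have ht : (ml - (acc.length : Int)).toNat = 1 := by omega
          rw [if_pos (show ml ≤ ((acc ++ [PySem.Str.rstrip raw]).length : Int) by simp; omega), ht]
          simp
        · have h' : ((acc ++ [PySem.Str.rstrip raw]).length : Int) < ml := by simp; omega
          have ht : (ml - (acc.length : Int)).toNat
              = (ml - ((acc ++ [PySem.Str.rstrip raw]).length : Int)).toNat + 1 := by
            simp; omega
          rw [if_neg (show ¬ ml ≤ ((acc ++ [PySem.Str.rstrip raw]).length : Int) by simp; omega)]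
          rw [ih (acc ++ [PySem.Str.rstrip raw]) c h', ht, List.take_succ_cons]
          simp

-- the body phase with the budget already exhausted (ml ≤ len(acc)): A still walks to the first
-- non-heading line, appends it when nonblank, and only then breaks
theorem pvLoopA_run_ge (ml : Int) : ∀ (ls acc : List String) (c : Int),
    ml ≤ (acc.length : Int) →
    pvLoopA ml ls acc false c =
      match (ls.map PySem.Str.rstrip).find? (fun l => !PySem.Str.startswith l "# ") with
      | some f => if PySem.Str.strip f ≠ "" then acc ++ [f] else acc
      | none => acc := by
  intro ls
  induction ls with
  | nil => intro acc c h; rfl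
  | cons raw rest ih =>
    intro acc c h
    rw [pvLoopA_cons]
    simp only [Bool.false_eq_true, if_false, List.map_cons]
    by_cases hs : PySem.Str.startswith (PySem.Str.rstrip raw) "# " = true
    · rw [List.find?_cons_of_neg (p := fun l => !PySem.Str.startswith l "# ")
        (by show ¬ (!PySem.Str.startswith (PySem.Str.rstrip raw) "# ") = true
            rw [hs]; exact (by decide))]
      simp only [hs, if_true]
      exact ih acc c h
    · have hs' : PySem.Str.startswith (PySem.Str.rstrip raw) "# " = false :=
        eq_false_of_ne_true hs
      rw [List.find?_cons_of_pos (p := fun l => !PySem.Str.startswith l "# ")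
        (show (!PySem.Str.startswith (PySem.Str.rstrip raw) "# ") = true by rw [hs']; rfl)]
      simp only [hs', Bool.false_eq_true, if_false]
      by_cases hb : PySem.Str.strip (PySem.Str.rstrip raw) = ""
      · have hbb : (PySem.Str.strip (PySem.Str.rstrip raw) != "") = false := by simp [hb]
        simp only [hbb, Bool.false_eq_true, if_false]
        rw [if_pos h]
        simp [hb]
      · have hbb : (PySem.Str.strip (PySem.Str.rstrip raw) != "") = true := by simp [hb]
        simp only [hbb, if_true]
        rw [if_pos (show ml ≤ ((acc ++ [PySem.Str.rstrip raw]).length : Int) by simp; omega)]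
        simp [hb]

-- B's after_delim is 'tail of dropWhile (≠ "---")'
theorem pvAfterDelimB_eq : ∀ (ls : List String),
    pvAfterDelimB ls = (ls.dropWhile (fun l => l != "---")).tail := by
  intro ls
  induction ls with
  | nil => rfl
  | cons x rest ih =>
    by_cases h : x = "---"
    · subst h
      simp only [pvAfterDelimB, PySem.List.index?_cons_self]
      rw [show ((0 : Nat) : Int) + 1 = ((1 : Nat) : Int) by norm_num,
        PySem.List.slice_from_natCast]
      simp only [List.drop_succ_cons, List.drop_zero, List.dropWhile_cons, bne_self_eq_false,
        Bool.false_eq_true, if_false, List.tail_cons]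
    · have hb : (x != "---") = true := by simp [h]
      have hx : PySem.List.index? (x :: rest) "---"
          = (PySem.List.index? rest "---").map (· + 1) :=
        PySem.List.index?_cons_of_ne rest h
      cases hi : PySem.List.index? rest "---" with
      | none =>
        have h0 : pvAfterDelimB rest = [] := by
          simp only [pvAfterDelimB, hi]
        simp only [pvAfterDelimB, hx, hi, Option.map_none, List.dropWhile_cons, hb, if_true]
        rw [← ih, h0]
      | some i =>
        have h1 : ((i + 1 : Nat) : Int) + 1 = ((i + 2 : Nat) : Int) := by push_cast; ring
        have h2 : (i : Int) + 1 = ((i + 1 : Nat) : Int) := by push_cast; ring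
        simp only [pvAfterDelimB, hx, hi, Option.map_some, List.dropWhile_cons, hb, if_true]
        rw [h1, PySem.List.slice_from_natCast, ← ih]
        simp only [pvAfterDelimB, hi, h2, PySem.List.slice_from_natCast]
        simp [List.drop_succ_cons, show i + 2 = (i + 1) + 1 by omega]

-- rstrip commutes with the raw-line frontmatter skip
theorem map_rstrip_skip : ∀ (ls : List String),
    ((ls.dropWhile (fun r => PySem.Str.rstrip r != "---")).tail).map PySem.Str.rstrip
      = ((ls.map PySem.Str.rstrip).dropWhile (fun l => l != "---")).tail := by
  intro ls
  induction ls with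
  | nil => rfl
  | cons raw rest ih =>
    by_cases h : PySem.Str.rstrip raw = "---"
    · have hb : (PySem.Str.rstrip raw != "---") = false := by simp [h]
      simp only [List.map_cons, List.dropWhile_cons, hb, Bool.false_eq_true, if_false,
        List.tail_cons]
    · have hb : (PySem.Str.rstrip raw != "---") = true := by simp [h]
      simp only [List.map_cons, List.dropWhile_cons, hb, if_true]
      exact ih

-- the list of body lines both sides work on, as D_'s pvBody
theorem map_rstrip_body (text : String) :
    (PySem.Str.startswith text "---" = true →
      ((((PySem.Str.splitlines text).dropWhile (fun r => PySem.Str.rstrip r != "---")).tail.dropWhile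
          (fun r => PySem.Str.rstrip r != "---")).tail).map PySem.Str.rstrip = pvBody text)
    ∧ (PySem.Str.startswith text "---" = false →
      (PySem.Str.splitlines text).map PySem.Str.rstrip = pvBody text) := by
  constructor
  · intro h
    simp only [pvBody]
    rw [if_pos h, map_rstrip_skip, map_rstrip_skip]
  · intro h
    simp only [pvBody]
    rw [if_neg (by rw [h]; exact Bool.false_ne_true)]

-- B's body equals pvBody after rstrip
theorem alt_body_eq (text : String) :
    (if PySem.Str.startswith text "---"
      then pvAfterDelimB (pvAfterDelimB ((PySem.Str.splitlines text).map PySem.Str.rstrip))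
      else (PySem.Str.splitlines text).map PySem.Str.rstrip) = pvBody text := by
  by_cases h : PySem.Str.startswith text "---" = true
  · rw [if_pos h]
    simp only [pvBody]
    rw [if_pos h, pvAfterDelimB_eq, pvAfterDelimB_eq]
  · rw [if_neg h]
    simp only [pvBody]
    rw [if_neg h]

-- all-whitespace texts: every rstripped line of an all-whitespace text is empty
theorem allws_of_strip_nil {cs : List Char} (h : PySem.Chars.strip cs = []) :
    ∀ c ∈ cs, PySem.Chars.isspace c = true := by
  unfold PySem.Chars.strip PySem.Chars.rstrip PySem.Chars.lstrip at h
  have h2 : List.dropWhile PySem.Chars.isspace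
      (List.dropWhile PySem.Chars.isspace cs).reverse = [] :=
    List.reverse_eq_nil_iff.mp h
  have h1 : ∀ x ∈ List.dropWhile PySem.Chars.isspace cs, PySem.Chars.isspace x = true :=
    fun x hx => List.dropWhile_eq_nil_iff.mp h2 x (List.mem_reverse.mpr hx)
  intro c hc
  rw [← List.takeWhile_append_dropWhile (p := PySem.Chars.isspace) (l := cs)] at hc
  rcases List.mem_append.mp hc with h' | h'
  · exact List.mem_takeWhile_imp h'
  · exact h1 c h'

theorem go_allws (isB : Char → Bool) :
    ∀ (s cur : List Char) (acc : List (List Char)),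
    (∀ c ∈ s, PySem.Chars.isspace c = true) →
    (∀ c ∈ cur, PySem.Chars.isspace c = true) →
    (∀ l ∈ acc, ∀ c ∈ l, PySem.Chars.isspace c = true) →
    ∀ l ∈ PySem.Chars.splitlines.go isB s cur acc, ∀ c ∈ l, PySem.Chars.isspace c = true := by
  intro s cur acc
  induction s, cur, acc using PySem.Chars.splitlines.go.induct isB with
  | case1 cur acc hemp =>
    intro _ _ hacc
    simp only [PySem.Chars.splitlines.go, hemp, if_true]
    intro l hl
    exact hacc l (List.mem_reverse.mp hl)
  | case2 cur acc hemp =>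
    intro _ hcur hacc
    simp only [PySem.Chars.splitlines.go, hemp, if_false]
    intro l hl
    rcases List.mem_cons.mp (List.mem_reverse.mp hl) with h' | h'
    · subst h'; intro ch hc; exact hcur ch (List.mem_reverse.mp hc)
    · exact hacc l h'
  | case3 rest cur acc ih =>
    intro hs hcur hacc
    simp only [PySem.Chars.splitlines.go]
    exact ih (fun ch hc => hs ch (by simp [hc]))
      (fun ch hc => absurd hc (List.not_mem_nil))
      (fun l hl => by
        rcases List.mem_cons.mp hl with h' | h'
        · subst h'; intro ch hc; exact hcur ch (List.mem_reverse.mp hc)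
        · exact hacc l h')
  | case4 ch rest cur acc hne hB ih =>
    intro hs hcur hacc
    simp only [PySem.Chars.splitlines.go, hB, if_true]
    exact ih (fun c hc => hs c (List.mem_cons_of_mem _ hc))
      (fun c hc => absurd hc (List.not_mem_nil))
      (fun l hl => by
        rcases List.mem_cons.mp hl with h' | h'
        · subst h'; intro c hc; exact hcur c (List.mem_reverse.mp hc)
        · exact hacc l h')
  | case5 ch rest cur acc hne hB ih =>
    intro hs hcur hacc
    simp only [PySem.Chars.splitlines.go, hB, if_false]
    exact ih (fun c hc => hs c (List.mem_cons_of_mem _ hc))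
      (fun c hc => by
        rcases List.mem_cons.mp hc with h' | h'
        · subst h'; exact hs c (by simp)
        · exact hcur c h')
      hacc

theorem str_eq_empty_of_toList_nil (s : String) (h : s.toList = []) : s = "" := by
  have := congrArg String.ofList h
  simpa [String.ofList_toList] using this

theorem rstrip_lines_of_strip_nil (text : String) (hst : PySem.Str.strip text = "") :
    ∀ raw ∈ PySem.Str.splitlines text, PySem.Str.rstrip raw = "" := by
  have hnil : PySem.Chars.strip text.toList = [] := by
    have := congrArg String.toList hst
    simpa using this
  have hws : ∀ c ∈ text.toList, PySem.Chars.isspace c = true := allws_of_strip_nil hnil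
  intro raw hr
  have hmem : raw.toList ∈ PySem.Chars.splitlines text.toList := by
    have hb := PySem.Str.splitlines_map_toList text
    rw [← hb]
    exact List.mem_map_of_mem hr
  have hallws : ∀ c ∈ raw.toList, PySem.Chars.isspace c = true := by
    unfold PySem.Chars.splitlines at hmem
    exact go_allws _ text.toList [] [] hws
      (fun c hc => absurd hc (List.not_mem_nil))
      (fun l hl => absurd hl (List.not_mem_nil)) raw.toList hmem
  apply str_eq_empty_of_toList_nil
  rw [PySem.Str.toList_rstrip]
  unfold PySem.Chars.rstrip
  rw [List.dropWhile_eq_nil_iff.mpr (fun x hx => hallws x (List.mem_reverse.mp hx))]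
  rfl

-- the shared backbone: A's loop value on the body phase for both budget regimes, against pvBody.
-- (pvLoopA runs on RAW lines; its rstrip'd view is pvBody, via map_rstrip_skip.)
theorem loopA_eq_body (text : String) (ml : Int) :
    ∃ bodyRaw : List String, bodyRaw.map PySem.Str.rstrip = pvBody text ∧
      (∀ raw ∈ bodyRaw, raw ∈ PySem.Str.splitlines text) ∧
      pvLoopA ml (PySem.Str.splitlines text) [] (PySem.Str.startswith text "---") 0
        = pvLoopA ml bodyRaw [] false 2 := by
  by_cases h : PySem.Str.startswith text "---" = true
  · refine ⟨(((PySem.Str.splitlines text).dropWhile (fun r => PySem.Str.rstrip r != "---")).tail.dropWhile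
        (fun r => PySem.Str.rstrip r != "---")).tail, (map_rstrip_body text).1 h, ?_, ?_⟩
    · exact fun raw hr =>
        (((List.tail_sublist _).trans (List.dropWhile_sublist _)).trans
          ((List.tail_sublist _).trans (List.dropWhile_sublist _))).subset hr
    · rw [h]
      rw [pvLoopA_fm0, pvLoopA_fm1]
  · refine ⟨PySem.Str.splitlines text, (map_rstrip_body text).2 (eq_false_of_ne_true h),
      fun raw hr => hr, ?_⟩
    rw [eq_false_of_ne_true h]
    exact pvLoopA_false_cnt ml _ _ 0 2

-- ===== VERDICT (by name: the statement is the Claim_ definition above) =====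
theorem first_section_excerpt_py_spec : Claim_unchanged_first_section_excerpt_py := by
  intro text ml _hdom
  unfold Spec_first_section_excerpt_py
  intro hnD
  obtain ⟨bodyRaw, hmap, hsub, hA⟩ := loopA_eq_body text ml
  simp only [first_section_excerpt_py, first_section_excerpt_py_alt]
  rw [hA, alt_body_eq text]
  by_cases hml : 0 < ml
  · rw [pvLoopA_run_lt ml bodyRaw [] 2 (by simp; omega)]
    rw [PySem.List.slice_to _ (show (0:Int) ≤ max 0 ml by omega)]
    rw [hmap]
    have hn : (ml - ((List.length ([] : List String)) : Int)).toNat = (max 0 ml).toNat := by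
      simp; omega
    rw [hn]
    simp
  · -- ml ≤ 0: B truncates to zero lines; with ¬ D_ the text is all whitespace, so every
    -- rstripped line is "" and A's walk also ends with the empty accumulator
    rw [pvLoopA_run_ge ml bodyRaw [] 2 (by simp; omega)]
    rw [PySem.List.slice_to _ (show (0:Int) ≤ max 0 ml by omega)]
    have hmax : (max 0 ml).toNat = 0 := by omega
    rw [hmax, List.take_zero]
    have hst : PySem.Str.strip text = "" := by
      by_contra hc
      exact hnD ⟨by omega, hc⟩
    have hline : ∀ raw ∈ PySem.Str.splitlines text, PySem.Str.rstrip raw = "" :=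
      rstrip_lines_of_strip_nil text hst
    cases hf : (bodyRaw.map PySem.Str.rstrip).find? (fun l => !PySem.Str.startswith l "# ") with
    | none => rfl
    | some f =>
      have hfmem : f ∈ bodyRaw.map PySem.Str.rstrip := List.mem_of_find?_eq_some hf
      rcases List.mem_map.mp hfmem with ⟨raw, hraw, hfe⟩
      have hfnil : f = "" := by rw [← hfe]; exact hline raw (hsub raw hraw)
      show PySem.Str.join "\n" (if PySem.Str.strip f ≠ "" then ([] : List String) ++ [f] else [])
        = PySem.Str.join "\n" []
      rw [if_neg (not_not_intro (by rw [hfnil]; decide))]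

theorem first_section_excerpt_py_changed : Claim_changed_first_section_excerpt_py := by
  unfold Claim_changed_first_section_excerpt_py; decide
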